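-- pv_equiv track=rewrite | github.com/zhongda-xia/leo-tools | Leo.py | getCrossPoint
-- ===== SOURCE A (Python) =====
-- def getCrossPoint(route1, route2): # return the cross point, and the hops from this cross point to the begin of each route
--     done = False
--     x = None
--     for i in range(len(route1)):
--         for j in range(len(route2)):
--             if route2[j] == route1[i]:
--                 x = route1[i]
--                 done = True
--                 break
--         if done:
--             break
--     return (x, i, j)
-- ===== SOURCE B (Python) =====
-- def getCrossPoint(route1, route2): # return the cross point, and the hops from this cross point to the begin of each route
--     idx = {}
--     for j, v in enumerate(route2):
--         if v not in idx:
--             idx[v] = j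
--     for i, v in enumerate(route1):
--         if v in idx:
--             return (v, i, idx[v])
--     return (None, len(route1) - 1, len(route2) - 1)
-- ===== Notes on version B (the rewrite author's own statement) =====
-- stated objective: alternative
-- what changed: Replaced A's nested rescan of route2 for every element of route1 by a dict value->first index built once over route2 and a single pass over route1.
import Mathlib
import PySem

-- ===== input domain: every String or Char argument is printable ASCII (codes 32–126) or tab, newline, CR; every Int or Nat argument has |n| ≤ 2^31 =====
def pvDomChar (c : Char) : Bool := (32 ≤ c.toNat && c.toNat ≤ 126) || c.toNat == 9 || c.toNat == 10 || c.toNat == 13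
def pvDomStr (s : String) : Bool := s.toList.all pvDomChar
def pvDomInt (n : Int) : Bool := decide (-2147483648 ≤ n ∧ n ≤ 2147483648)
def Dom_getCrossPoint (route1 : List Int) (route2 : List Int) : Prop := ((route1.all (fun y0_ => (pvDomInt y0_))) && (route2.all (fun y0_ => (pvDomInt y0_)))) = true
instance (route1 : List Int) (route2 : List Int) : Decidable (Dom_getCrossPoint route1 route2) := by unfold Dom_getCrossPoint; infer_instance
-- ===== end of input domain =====

-- B replaces A's nested rescans of route2 by a first-index dict built once over route2 plus a single pass over route1.

-- ===== PORT A =====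
-- inner 'for j in range(len(route2))' loop: carries the current j; on fall-through j ends at len-1
def innerA (v : Int) : List Int → Int → Bool × Int
  | [], j => (false, j - 1)
  | w :: rest, j => if w = v then (true, j) else innerA v rest (j + 1)

-- outer 'for i in range(len(route1))' loop: carries i and the j left by the last inner loop
def outerA (route2 : List Int) : List Int → Int → Int → Option Int × Int × Int
  | [], i, j => (none, i - 1, j)
  | v :: rest, i, j =>
      match innerA v route2 0 with
      | (true, j') => (some v, i, j')
      | (false, j') => outerA route2 rest (i + 1) j'

def getCrossPoint (route1 : List Int) (route2 : List Int) : Option Int × Int × Int :=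
  outerA route2 route1 0 0

-- ===== PORT B =====
-- 'for j, v in enumerate(route2): if v not in idx: idx[v] = j'
def buildB : List Int → Int → PySem.Dict Int Int → PySem.Dict Int Int
  | [], _, d => d
  | v :: rest, j, d => buildB rest (j + 1) (if (d.get? v).isSome then d else d.insert v j)

-- 'for i, v in enumerate(route1): if v in idx: return (v, i, idx[v])' then the no-cross fallback
def scanB (d : PySem.Dict Int Int) (n1 n2 : Int) : List Int → Int → Option Int × Int × Int
  | [], _ => (none, n1 - 1, n2 - 1)
  | v :: rest, i =>
      match d.get? v with
      | some j => (some v, i, j)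
      | none => scanB d n1 n2 rest (i + 1)

def getCrossPoint_alt (route1 : List Int) (route2 : List Int) : Option Int × Int × Int :=
  scanB (buildB route2 0 PySem.Dict.empty) (route1.length : Int) (route2.length : Int) route1 0

-- ===== PRECONDITION & SPEC =====
-- Pre_ excludes empty route1 or route2, on which A raises UnboundLocalError (a loop index is read unassigned)
def Pre_getCrossPoint (route1 : List Int) (route2 : List Int) : Prop := route1 ≠ [] ∧ route2 ≠ []
instance (route1 : List Int) (route2 : List Int) : Decidable (Pre_getCrossPoint route1 route2) := by unfold Pre_getCrossPoint; infer_instance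
def pvWitness_getCrossPoint : List Int × List Int := ([1, 2], [3, 2])

def Spec_getCrossPoint (route1 : List Int) (route2 : List Int) (out : Option Int × Int × Int) : Prop := out = getCrossPoint_alt route1 route2
instance (route1 : List Int) (route2 : List Int) (out : Option Int × Int × Int) : Decidable (Spec_getCrossPoint route1 route2 out) := by unfold Spec_getCrossPoint; infer_instance

-- ===== CLAIM (what is proved, stated in full; the proofs are below) =====
def Claim_equal_getCrossPoint : Prop := ∀ (route1 : List Int) (route2 : List Int), Dom_getCrossPoint route1 route2 → Pre_getCrossPoint route1 route2 → Spec_getCrossPoint route1 route2 (getCrossPoint route1 route2)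

-- ===== LEMMAS AND PROOFS =====

-- on fall-through the inner loop leaves j at (start + len - 1)
lemma innerA_false (v : Int) : ∀ (l : List Int) (j0 b : Int),
    innerA v l j0 = (false, b) → b = j0 + l.length - 1 := by
  intro l
  induction l with
  | nil => intro j0 b h; simp [innerA] at h; simp [h]
  | cons w rest ih =>
      intro j0 b h
      simp only [innerA] at h
      by_cases hw : w = v
      · simp [hw] at h
      · simp only [if_neg hw] at h
        have := ih (j0 + 1) b h
        simp [this]; ring

-- the first-index dict answers exactly what the inner scan finds
lemma buildB_get (v : Int) : ∀ (l : List Int) (j : Int) (d : PySem.Dict Int Int),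
    (buildB l j d).get? v =
      match d.get? v, innerA v l j with
      | some x, _ => some x
      | none, (true, k) => some k
      | none, (false, _) => none := by
  intro l
  induction l with
  | nil =>
      intro j d
      simp only [buildB, innerA]
      cases d.get? v <;> rfl
  | cons w rest ih =>
      intro j d
      simp only [buildB, innerA]
      by_cases hw : w = v
      · subst hw
        cases hd : d.get? w with
        | some x =>
            simp only [Option.isSome_some, if_true]
            rw [ih]
            simp [hd]
        | none =>
            simp only [Option.isSome_none, Bool.false_eq_true, if_false]
            rw [ih]
            simp [PySem.Dict.get?_insert_self]
      · rw [if_neg hw]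
        have hne : (if (d.get? w).isSome then d else d.insert w j).get? v = d.get? v := by
          split
          · rfl
          · exact PySem.Dict.get?_insert_of_ne d j (Ne.symm hw)
        rw [ih, hne]

-- the outer loop agrees with B's single scan over route1
lemma outer_scan (route2 : List Int) :
    ∀ (r1 : List Int) (i j : Int),
      (r1 = [] → j = (route2.length : Int) - 1) →
      outerA route2 r1 i j =
        scanB (buildB route2 0 PySem.Dict.empty) (i + r1.length) (route2.length : Int) r1 i := by
  intro r1
  induction r1 with
  | nil =>
      intro i j hj
      simp [outerA, scanB, hj rfl]
  | cons v rest ih =>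
      intro i j hj
      simp only [outerA, scanB]
      have hb := buildB_get v route2 0 PySem.Dict.empty
      cases hin : innerA v route2 0 with
      | mk found j' =>
          cases found with
          | true =>
              rw [hin] at hb
              simp only [PySem.Dict.get?_empty] at hb
              rw [hb]
          | false =>
              rw [hin] at hb
              simp only [PySem.Dict.get?_empty] at hb
              rw [hb]
              have hj' : j' = (route2.length : Int) - 1 := by
                have := innerA_false v route2 0 j' hin
                simp at this; omega
              have harith : i + ((v :: rest).length : Int) = i + 1 + (rest.length : Int) := by
                simp only [List.length_cons]; push_cast; ring
              show outerA route2 rest (i + 1) j' =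
                scanB (buildB route2 0 PySem.Dict.empty) (i + ((v :: rest).length : Int)) (route2.length : Int) rest (i + 1)
              rw [harith, ih (i + 1) j' (fun _ => hj')]

-- ===== VERDICT (by name: the statement is the Claim_ definition above) =====
theorem getCrossPoint_spec : Claim_equal_getCrossPoint := by
  intro route1 route2 _ hpre
  unfold Spec_getCrossPoint getCrossPoint getCrossPoint_alt
  have := outer_scan route2 route1 0 0 (fun h => absurd h hpre.1)
  rw [this]
  congr 1
  omega
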